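-- pv_equiv track=rewrite | github.com/ivanhonis/ai_home | b/prompts/common.py | get_relevant_use_tips
-- ===== SOURCE A (Python) =====
-- from typing import Dict, Any, List
--
-- def get_relevant_use_tips(use_data: List[Dict[str, Any]], allowed_tools: List[str]) -> str:
--     """
--     Extracts usage tips from 'use.json' relevant to the currently allowed tools.
--     """
--     if not use_data:
--         return ""
--
--     relevant_lines = []
--     for entry in use_data:
--         tool_name = entry.get("tool")
--         is_relevant = False
--
--         if tool_name in allowed_tools:
--             is_relevant = True
--         else:
--             # Handle wildcards (e.g., fs.* matches fs.read)
--             for allowed in allowed_tools: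
--                 if allowed.endswith("*") and tool_name.startswith(allowed[:-1]):
--                     is_relevant = True
--                     break
--                 # Special case handling if needed
--                 if allowed == "memory.add" and tool_name.startswith("memory.add"):
--                     is_relevant = True
--                     break
--
--         if is_relevant:
--             relevant_lines.append(f"- {tool_name}: {entry.get('insight', '')}")
--
--     if not relevant_lines:
--         return ""
--     return "[TOOL TIPS (FROM PAST EXPERIENCE)]\n" + "\n".join(relevant_lines)
-- ===== SOURCE B (Python) =====
-- def get_relevant_use_tips(use_data, allowed_tools):
--     exact = set(allowed_tools)
--     prefixes = {a[:-1] for a in allowed_tools if a.endswith("*")}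
--     if "memory.add" in exact:
--         prefixes.add("memory.add")
--     lines = []
--     for entry in use_data:
--         tool = entry.get("tool")
--         if tool is None:
--             continue
--         if tool in exact or any(tool[:k] in prefixes for k in range(len(tool) + 1)):
--             lines.append(f"- {tool}: {entry.get('insight', '')}")
--     if not lines:
--         return ""
--     return "[TOOL TIPS (FROM PAST EXPERIENCE)]\n" + "\n".join(lines)
-- ===== Notes on version B (the rewrite author's own statement) =====
-- stated objective: faster
-- what changed: B precomputes a set of allowed names and a set of wildcard prefixes once, then tests each tool by set membership over its own prefixes, replacing A's inner scan of allowed_tools per entry.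
import Mathlib
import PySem

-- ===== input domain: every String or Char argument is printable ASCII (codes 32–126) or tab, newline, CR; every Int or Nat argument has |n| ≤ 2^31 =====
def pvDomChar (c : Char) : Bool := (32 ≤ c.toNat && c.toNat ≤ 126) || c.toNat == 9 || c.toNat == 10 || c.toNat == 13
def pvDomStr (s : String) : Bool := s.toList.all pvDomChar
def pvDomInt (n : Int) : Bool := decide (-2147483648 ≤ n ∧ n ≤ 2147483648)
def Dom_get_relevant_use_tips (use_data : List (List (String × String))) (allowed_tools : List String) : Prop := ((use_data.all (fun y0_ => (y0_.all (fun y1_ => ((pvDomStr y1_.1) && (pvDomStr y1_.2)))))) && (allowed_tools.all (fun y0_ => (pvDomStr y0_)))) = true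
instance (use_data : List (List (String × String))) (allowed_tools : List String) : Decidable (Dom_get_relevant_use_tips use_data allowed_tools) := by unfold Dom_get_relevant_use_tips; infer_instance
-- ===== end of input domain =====

-- B replaces A's per-entry scan of allowed_tools by a precomputed name set plus a prefix set queried
-- over each tool's own prefixes (objective: faster).


-- ===== PORT A =====
-- entry.get(k): dict as association list, first match
def pvGet? (entry : List (String × String)) (k : String) : Option String :=
  (entry.find? (fun p => p.1 == k)).map (·.2)

-- A's inner 'for allowed in allowed_tools' loop with its breaks (result is the Bool is_relevant)
def pvAWild (tool : String) (allowed : List String) : Bool :=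
  match allowed with
  | [] => false
  | a :: rest =>
    if PySem.Str.endswith a "*" && PySem.Str.startswith tool (PySem.Str.slice a none (some (-1))) then true
    else if a == "memory.add" && PySem.Str.startswith tool "memory.add" then true
    else pvAWild tool rest

def get_relevant_use_tips (use_data : List (List (String × String))) (allowed_tools : List String) : String :=
  if use_data.isEmpty then "" else
  let relevant_lines := use_data.foldl (fun acc entry =>
    match pvGet? entry "tool" with
    -- tool_name = None: 'None in allowed_tools' is False, and under Pre_ the wildcard loop
    -- (which would raise AttributeError) is never entered, so the entry is skipped
    | none => acc
    | some tool_name =>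
      let is_relevant := List.contains allowed_tools tool_name || pvAWild tool_name allowed_tools
      if is_relevant then
        acc ++ ["- " ++ tool_name ++ ": " ++ (pvGet? entry "insight").getD ""]
      else acc) []
  if relevant_lines.isEmpty then "" else
    "[TOOL TIPS (FROM PAST EXPERIENCE)]\n" ++ PySem.Str.join "\n" relevant_lines

-- ===== PORT B =====
def get_relevant_use_tips_alt (use_data : List (List (String × String))) (allowed_tools : List String) : String :=
  let exact : PySem.Set String := PySem.Set.ofList allowed_tools
  let prefixes0 : PySem.Set String :=
    PySem.Set.ofList ((allowed_tools.filter (fun a => PySem.Str.endswith a "*")).map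
      (fun a => PySem.Str.slice a none (some (-1))))
  let prefixes : PySem.Set String :=
    if PySem.Set.contains exact "memory.add" then PySem.Set.add prefixes0 "memory.add" else prefixes0
  let lines := use_data.foldl (fun acc entry =>
    match pvGet? entry "tool" with
    | none => acc
    | some tool =>
      if PySem.Set.contains exact tool ||
         (PySem.List.pyRange 0 ((tool.length : Int) + 1) 1).any
           (fun k => PySem.Set.contains prefixes (PySem.Str.slice tool none (some k))) then
        acc ++ ["- " ++ tool ++ ": " ++ (pvGet? entry "insight").getD ""]
      else acc) []
  if lines.isEmpty then "" else
    "[TOOL TIPS (FROM PAST EXPERIENCE)]\n" ++ PySem.Str.join "\n" lines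

-- ===== PRECONDITION & SPEC =====
-- Pre_ excludes exactly the inputs where A raises AttributeError: some entry lacks a "tool" key
-- while allowed_tools contains a wildcard pattern or "memory.add" (None.startswith is then called).
def Pre_get_relevant_use_tips (use_data : List (List (String × String))) (allowed_tools : List String) : Prop :=
  (∀ e ∈ use_data, (e.find? (fun p => p.1 == "tool")).isSome) ∨
  (∀ a ∈ allowed_tools, PySem.Str.endswith a "*" = false ∧ a ≠ "memory.add")

instance (use_data : List (List (String × String))) (allowed_tools : List String) : Decidable (Pre_get_relevant_use_tips use_data allowed_tools) := by unfold Pre_get_relevant_use_tips; infer_instance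

def pvWitness_get_relevant_use_tips : (List (List (String × String))) × List String :=
  ([[("tool", "fs.read"), ("insight", "use absolute paths")]], ["fs.*", "web.search"])

def Spec_get_relevant_use_tips (use_data : List (List (String × String))) (allowed_tools : List String) (out : String) : Prop := out = get_relevant_use_tips_alt use_data allowed_tools
instance (use_data : List (List (String × String))) (allowed_tools : List String) (out : String) : Decidable (Spec_get_relevant_use_tips use_data allowed_tools out) := by unfold Spec_get_relevant_use_tips; infer_instance

-- ===== CLAIM (what is proved, stated in full; the proofs are below) =====
def Claim_equal_get_relevant_use_tips : Prop := ∀ (use_data : List (List (String × String))) (allowed_tools : List String), Dom_get_relevant_use_tips use_data allowed_tools → Pre_get_relevant_use_tips use_data allowed_tools → Spec_get_relevant_use_tips use_data allowed_tools (get_relevant_use_tips use_data allowed_tools)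

-- ===== LEMMAS AND PROOFS =====
lemma pv_ite_or (c1 c2 r : Bool) :
    (if c1 = true then true else if c2 = true then true else r) = (c1 || c2 || r) := by
  cases c1 <;> cases c2 <;> simp

-- A's wildcard loop is an 'any' over allowed_tools
lemma pvAWild_eq_any (t : String) (al : List String) :
    pvAWild t al = al.any (fun a =>
      (PySem.Str.endswith a "*" && PySem.Str.startswith t (PySem.Str.slice a none (some (-1)))) ||
      (a == "memory.add" && PySem.Str.startswith t "memory.add")) := by
  induction al with
  | nil => rfl
  | cons a rest ih =>
    rw [List.any_cons, ← ih]
    exact pv_ite_or _ _ _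

lemma bool_ext {a b : Bool} (h : a = true ↔ b = true) : a = b := by
  cases a <;> cases b <;> simp_all

-- t.startswith(p) iff p is one of the slices t[:k], 0 <= k <= len(t)
lemma startswith_iff_slice (t p : String) :
    PySem.Str.startswith t p = true ↔
      ∃ k : Int, (0 ≤ k ∧ k < (t.length : Int) + 1) ∧ PySem.Str.slice t none (some k) = p := by
  rw [PySem.Str.startswith_eq, PySem.Chars.startswith_iff]
  constructor
  · intro h
    refine ⟨(p.length : Int), ⟨by positivity, ?_⟩, ?_⟩
    · have hle : p.toList.length ≤ t.toList.length := h.length_le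
      simp only [String.length_toList] at hle
      omega
    · rw [← String.toList_inj, PySem.Str.toList_slice, PySem.Chars.slice_eq_listSlice,
        PySem.List.slice_to_natCast, ← String.length_toList]
      exact (List.prefix_iff_eq_take.mp h).symm
  · rintro ⟨k, ⟨hk0, _⟩, rfl⟩
    rw [PySem.Str.toList_slice, PySem.Chars.slice_eq_listSlice, PySem.List.slice_to _ hk0]
    exact List.take_prefix _ _

-- the per-entry relevance conditions of the two ports coincide
lemma cond_eq (al : List String) (t : String) :
    (List.contains al t || pvAWild t al)
    = (PySem.Set.contains (PySem.Set.ofList al) t ||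
       (PySem.List.pyRange 0 ((t.length : Int) + 1) 1).any
         (fun k => PySem.Set.contains
           (if PySem.Set.contains (PySem.Set.ofList al) "memory.add" = true then
              PySem.Set.add (PySem.Set.ofList ((al.filter (fun a => PySem.Str.endswith a "*")).map
                (fun a => PySem.Str.slice a none (some (-1))))) "memory.add"
            else
              PySem.Set.ofList ((al.filter (fun a => PySem.Str.endswith a "*")).map
                (fun a => PySem.Str.slice a none (some (-1)))))
           (PySem.Str.slice t none (some k)))) := by
  apply bool_ext
  by_cases hm : "memory.add" ∈ al
  · have hmc : PySem.Set.contains (PySem.Set.ofList al) "memory.add" = true :=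
      (PySem.Set.contains_iff _ _).mpr ((PySem.Set.mem_ofList _ _).mpr hm)
    simp only [hmc, if_true, Bool.or_eq_true, pvAWild_eq_any, List.any_eq_true,
      PySem.Set.contains_iff, PySem.Set.mem_ofList, PySem.Set.mem_add,
      PySem.List.mem_pyRange_one, List.contains_eq_mem, decide_eq_true_eq,
      Bool.and_eq_true, beq_iff_eq, List.mem_map, List.mem_filter]
    constructor
    · rintro (ht | ⟨a, ha, ⟨he, hs⟩ | ⟨rfl, hs⟩⟩)
      · exact Or.inl ht
      · rcases (startswith_iff_slice t _).mp hs with ⟨k, hk, hsl⟩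
        exact Or.inr ⟨k, hk, Or.inl ⟨a, ⟨ha, he⟩, hsl.symm⟩⟩
      · rcases (startswith_iff_slice t _).mp hs with ⟨k, hk, hsl⟩
        exact Or.inr ⟨k, hk, Or.inr hsl⟩
    · rintro (ht | ⟨k, hk, ⟨a, ⟨ha, he⟩, hsl⟩ | hsl⟩)
      · exact Or.inl ht
      · exact Or.inr ⟨a, ha, Or.inl ⟨he, (startswith_iff_slice t _).mpr ⟨k, hk, hsl.symm⟩⟩⟩
      · exact Or.inr ⟨"memory.add", hm, Or.inr ⟨rfl, (startswith_iff_slice t _).mpr ⟨k, hk, hsl⟩⟩⟩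
  · have hmc : PySem.Set.contains (PySem.Set.ofList al) "memory.add" = false := by
      rw [Bool.eq_false_iff]
      intro hc
      exact hm ((PySem.Set.mem_ofList _ _).mp ((PySem.Set.contains_iff _ _).mp hc))
    simp only [hmc, Bool.false_eq_true, if_false, Bool.or_eq_true, pvAWild_eq_any,
      List.any_eq_true, PySem.Set.contains_iff, PySem.Set.mem_ofList,
      PySem.List.mem_pyRange_one, List.contains_eq_mem, decide_eq_true_eq,
      Bool.and_eq_true, beq_iff_eq, List.mem_map, List.mem_filter]
    constructor
    · rintro (ht | ⟨a, ha, ⟨he, hs⟩ | ⟨rfl, hs⟩⟩)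
      · exact Or.inl ht
      · rcases (startswith_iff_slice t _).mp hs with ⟨k, hk, hsl⟩
        exact Or.inr ⟨k, hk, a, ⟨ha, he⟩, hsl.symm⟩
      · exact absurd ha hm
    · rintro (ht | ⟨k, hk, a, ⟨ha, he⟩, hsl⟩)
      · exact Or.inl ht
      · exact Or.inr ⟨a, ha, Or.inl ⟨he, (startswith_iff_slice t _).mpr ⟨k, hk, hsl.symm⟩⟩⟩

-- the two per-entry fold steps are the same function
lemma step_eq (al : List String) :
    (fun (acc : List String) (entry : List (String × String)) =>
      match pvGet? entry "tool" with
      | none => acc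
      | some tool_name =>
        if (List.contains al tool_name || pvAWild tool_name al) = true then
          acc ++ ["- " ++ tool_name ++ ": " ++ (pvGet? entry "insight").getD ""]
        else acc)
    = (fun (acc : List String) (entry : List (String × String)) =>
      match pvGet? entry "tool" with
      | none => acc
      | some tool =>
        if (PySem.Set.contains (PySem.Set.ofList al) tool ||
           (PySem.List.pyRange 0 ((tool.length : Int) + 1) 1).any
             (fun k => PySem.Set.contains
               (if PySem.Set.contains (PySem.Set.ofList al) "memory.add" = true then
                  PySem.Set.add (PySem.Set.ofList ((al.filter (fun a => PySem.Str.endswith a "*")).map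
                    (fun a => PySem.Str.slice a none (some (-1))))) "memory.add"
                else
                  PySem.Set.ofList ((al.filter (fun a => PySem.Str.endswith a "*")).map
                    (fun a => PySem.Str.slice a none (some (-1)))))
               (PySem.Str.slice tool none (some k)))) = true then
          acc ++ ["- " ++ tool ++ ": " ++ (pvGet? entry "insight").getD ""]
        else acc) := by
  funext acc entry
  cases hg : pvGet? entry "tool" with
  | none => rfl
  | some t => simp only [cond_eq]

-- ===== VERDICT (by name: the statement is the Claim_ definition above) =====
theorem get_relevant_use_tips_spec : Claim_equal_get_relevant_use_tips := by
  intro ud al _ _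
  unfold Spec_get_relevant_use_tips
  simp only [get_relevant_use_tips, get_relevant_use_tips_alt]
  rw [step_eq al]
  cases ud with
  | nil => simp
  | cons e rest => simp
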